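-- pv_equiv track=rewrite | github.com/dperumsby/adventofcode2020 | day10/day10.py | num_of_paths
-- ===== SOURCE A (Python) =====
-- def num_of_paths(section):
--     total = 0
--     start = section[0]
--     end = section[-1]
--     queue = [[start]]
--
--     while queue:
--         path = queue.pop(0)
--
--         if path[-1] == end:
--             total +=1
--             continue
--
--         position = path[-1]
--
--         for i in [1, 2, 3]:
--             if position + i in section:
--                 path_copy = path.copy()
--                 path_copy.append(position + i)
--                 queue.append(path_copy)
--     return total
-- ===== SOURCE B (Python) =====
-- def num_of_paths(section):
--     start = section[0]
--     end = section[-1]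
--     ways = {}
--     for v in sorted(set(section), reverse=True):
--         ways[v] = 1 if v == end else sum(ways.get(v + i, 0) for i in (1, 2, 3))
--     return ways[start]
-- ===== Notes on version B (the rewrite author's own statement) =====
-- stated objective: alternative
-- what changed: A enumerates every path explicitly with a BFS queue of path copies (exponential in the number of paths); B computes, for each distinct value in descending sorted order, the number of ways to reach the end value with a dictionary DP and returns the entry for the start value.
import Mathlib
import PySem

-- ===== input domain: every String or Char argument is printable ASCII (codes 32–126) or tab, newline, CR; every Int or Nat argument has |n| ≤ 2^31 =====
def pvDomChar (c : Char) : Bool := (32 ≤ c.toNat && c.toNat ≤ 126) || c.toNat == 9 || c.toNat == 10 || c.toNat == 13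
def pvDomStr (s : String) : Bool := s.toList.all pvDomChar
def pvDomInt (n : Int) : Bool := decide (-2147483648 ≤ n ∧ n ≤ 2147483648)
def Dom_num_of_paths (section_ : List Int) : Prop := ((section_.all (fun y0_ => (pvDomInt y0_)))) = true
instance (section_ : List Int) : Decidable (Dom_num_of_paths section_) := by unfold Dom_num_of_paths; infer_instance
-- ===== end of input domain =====

-- B replaces A's BFS enumeration of every individual path by a dictionary DP over the
-- distinct values in descending order (ways-to-end per value); both return the number of
-- +1/+2/+3 step paths from the first element to the last. Pre_ excludes only the empty list,
-- on which the Python A raises IndexError.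


-- ===== PORT A =====
-- path[-1]; every path in A's queue is nonempty, so the default is never read
def pvLastA (l : List Int) : Int := (PySem.List.pyGet? l (-1)).getD 0

-- the while-queue loop of A; fuel only makes the recursion structural — it is chosen
-- large enough (proved in the lemmas below) that it never runs out
def pvLoopA (section_ : List Int) (end_ : Int) : Nat → List (List Int) → Int → Int
  | 0, _, total => total
  | _ + 1, [], total => total
  | fuel + 1, path :: queue, total =>
      if pvLastA path = end_ then
        pvLoopA section_ end_ fuel queue (total + 1)
      else
        pvLoopA section_ end_ fuel
          ([(1 : Int), 2, 3].foldl
            (fun q i =>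
              if pvLastA path + i ∈ section_ then q ++ [path ++ [pvLastA path + i]] else q)
            queue)
          total

def num_of_paths (section_ : List Int) : Int :=
  match PySem.List.pyGet? section_ 0, PySem.List.pyGet? section_ (-1) with
  | some start, some end_ => pvLoopA section_ end_ (4 ^ section_.length + 1) [[start]] 0
  | _, _ => 0  -- Python raises IndexError here (empty list); excluded by Pre_

-- ===== PORT B =====
def num_of_paths_alt (section_ : List Int) : Int :=
  let start := (PySem.List.pyGet? section_ 0).getD 0      -- section[0]; Pre_: section ≠ []
  let end_ := (PySem.List.pyGet? section_ (-1)).getD 0    -- section[-1]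
  let vals := PySem.List.sorted (PySem.Set.ofList section_) (fun x => x) true
  let ways := vals.foldl
    (fun (d : PySem.Dict Int Int) v =>
      d.insert v
        (if v = end_ then 1
         else [(1 : Int), 2, 3].foldl (fun s i => s + d.getD (v + i) 0) 0))
    PySem.Dict.empty
  (ways.get? start).getD 0  -- ways[start]; start is always a key (Pre_), so no KeyError

-- ===== PRECONDITION & SPEC =====
-- excludes only the empty list, on which A raises IndexError at section[0]
def Pre_num_of_paths (section_ : List Int) : Prop := section_ ≠ []
instance (section_ : List Int) : Decidable (Pre_num_of_paths section_) := by
  unfold Pre_num_of_paths; infer_instance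
def pvWitness_num_of_paths : List Int := [1, 2, 4]

def Spec_num_of_paths (section_ : List Int) (out : Int) : Prop := out = num_of_paths_alt section_
instance (section_ : List Int) (out : Int) : Decidable (Spec_num_of_paths section_ out) := by unfold Spec_num_of_paths; infer_instance

-- ===== CLAIM (what is proved, stated in full; the proofs are below) =====
def Claim_equal_num_of_paths : Prop := ∀ (section_ : List Int), Dom_num_of_paths section_ → Pre_num_of_paths section_ → Spec_num_of_paths section_ (num_of_paths section_)

-- ===== LEMMAS AND PROOFS =====

-- number of elements of the list strictly above x (the termination measure)
def pvMu (sec : List Int) (x : Int) : Nat := (sec.filter (fun v => x < v)).length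

lemma pvMu_lt (sec : List Int) {x y : Int} (hy : y ∈ sec) (hxy : x < y) :
    pvMu sec y < pvMu sec x := by
  unfold pvMu
  induction sec with
  | nil => cases hy
  | cons a t ih =>
    rcases List.mem_cons.mp hy with rfl | hmem
    · have hle : (t.filter (fun v => decide (y < v))).length ≤ (t.filter (fun v => decide (x < v))).length := by
        apply List.Sublist.length_le
        apply List.monotone_filter_right
        intro v hv
        simp only [decide_eq_true_eq] at *
        exact lt_trans hxy hv
      simp [hxy]
      omega
    · have := ih hmem
      simp only [List.filter_cons]
      by_cases ha : y < a
      · have hxa : x < a := lt_trans hxy ha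
        simp [ha, hxa]; omega
      · by_cases hxa : x < a
        · simp [ha, hxa]; omega
        · simp [ha, hxa]; omega

-- number of A's paths from x to end_ stepping +1/+2/+3 inside sec (a path is counted when
-- it first reaches end_; characterises both programs)
def pvG (sec : List Int) (end_ : Int) (x : Int) : Int :=
  if x = end_ then 1
  else
    (if x + 1 ∈ sec then pvG sec end_ (x + 1) else 0)
    + (if x + 2 ∈ sec then pvG sec end_ (x + 2) else 0)
    + (if x + 3 ∈ sec then pvG sec end_ (x + 3) else 0)
termination_by pvMu sec x
decreasing_by
  all_goals rename_i hmem; exact pvMu_lt sec hmem (by omega)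

-- potential of the queue: strictly decreases with each loop iteration
def pvPhi (sec : List Int) (queue : List (List Int)) : Nat :=
  (queue.map (fun p => 4 ^ pvMu sec (pvLastA p))).sum

lemma pvLastA_append (p : List Int) (x : Int) : pvLastA (p ++ [x]) = x := by
  simp [pvLastA, PySem.List.pyGet?_neg_one_append_singleton]

lemma pvPow4_pos (k : Nat) : 0 < 4 ^ k := Nat.pow_pos (by norm_num)

lemma pvPhiBound (sec : List Int) (l : Int) :
    (if l + 1 ∈ sec then 4 ^ pvMu sec (l + 1) else 0)
    + (if l + 2 ∈ sec then 4 ^ pvMu sec (l + 2) else 0)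
    + (if l + 3 ∈ sec then 4 ^ pvMu sec (l + 3) else 0) < 4 ^ pvMu sec l := by
  by_cases hany : l + 1 ∈ sec ∨ l + 2 ∈ sec ∨ l + 3 ∈ sec
  · have hm : 1 ≤ pvMu sec l := by
      rcases hany with h | h | h
      · have := pvMu_lt sec (x := l) h (by omega); omega
      · have := pvMu_lt sec (x := l) h (by omega); omega
      · have := pvMu_lt sec (x := l) h (by omega); omega
    have e4 : 4 ^ pvMu sec l = 4 * 4 ^ (pvMu sec l - 1) := by
      conv_lhs => rw [show pvMu sec l = (pvMu sec l - 1) + 1 by omega]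
      rw [pow_succ]; ring
    have hb : ∀ i : Int, 0 < i →
        (if l + i ∈ sec then 4 ^ pvMu sec (l + i) else 0) ≤ 4 ^ (pvMu sec l - 1) := by
      intro i hi
      by_cases hmem : l + i ∈ sec
      · have := pvMu_lt sec (x := l) hmem (by omega)
        simp only [hmem, if_pos]
        exact Nat.pow_le_pow_right (by norm_num) (by omega)
      · simp [hmem]
    have b1 := hb 1 (by norm_num)
    have b2 := hb 2 (by norm_num)
    have b3 := hb 3 (by norm_num)
    have := pvPow4_pos (pvMu sec l - 1)
    omega
  · push Not at hany
    simp [hany.1, hany.2.1, hany.2.2]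

lemma pvLoopA_eq (sec : List Int) (e : Int) :
    ∀ (fuel : Nat) (queue : List (List Int)) (total : Int),
      pvPhi sec queue < fuel →
      pvLoopA sec e fuel queue total
        = total + (queue.map (fun p => pvG sec e (pvLastA p))).sum := by
  intro fuel
  induction fuel with
  | zero =>
    intro queue total h
    exact absurd h (by omega)
  | succ fuel ih =>
    intro queue total h
    cases queue with
    | nil => simp [pvLoopA]
    | cons path queue =>
      rw [show pvPhi sec (path :: queue)
          = 4 ^ pvMu sec (pvLastA path) + pvPhi sec queue from by simp [pvPhi]] at h
      by_cases hl : pvLastA path = e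
      · have hq : pvPhi sec queue < fuel := by
          have := pvPow4_pos (pvMu sec (pvLastA path)); omega
        have hg : pvG sec e (pvLastA path) = 1 := by rw [pvG]; simp [hl]
        simp only [pvLoopA, if_pos hl, ih queue (total + 1) hq, List.map_cons,
          List.sum_cons, hg]
        ring
      · have hgl : pvG sec e (pvLastA path)
            = (if pvLastA path + 1 ∈ sec then pvG sec e (pvLastA path + 1) else 0)
            + (if pvLastA path + 2 ∈ sec then pvG sec e (pvLastA path + 2) else 0)
            + (if pvLastA path + 3 ∈ sec then pvG sec e (pvLastA path + 3) else 0) := by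
          rw [pvG]; simp [hl]
        have hb := pvPhiBound sec (pvLastA path)
        by_cases h1 : pvLastA path + 1 ∈ sec <;> by_cases h2 : pvLastA path + 2 ∈ sec <;>
          by_cases h3 : pvLastA path + 3 ∈ sec <;>
        · simp only [pvLoopA, if_neg hl, List.foldl]
          simp [h1, h2, h3] at hgl hb ⊢
          rw [ih _ total ?_]
          · simp [List.map_append, pvLastA_append, hgl, List.sum_append]
            try ring
          · simp only [pvPhi] at h ⊢
            simp [List.map_append, List.sum_append, pvLastA_append] at h ⊢
            have hp := pvPow4_pos (pvMu sec (pvLastA path))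
            omega

-- the DP foldl of B fills the dictionary with pvG at every key, descending order first
lemma pvFoldlB_get (sec : List Int) (e : Int) :
    ∀ (rest : List Int) (d : PySem.Dict Int Int),
      rest.Pairwise (fun a b => b < a) →
      (∀ r ∈ rest, r ∈ sec) →
      (∀ x ∈ sec, x ∉ rest → d.get? x = some (pvG sec e x)) →
      (∀ x : Int, (d.get? x).isSome = true → x ∈ sec) →
      ∀ x ∈ sec,
        (rest.foldl
          (fun (d : PySem.Dict Int Int) v =>
            d.insert v
              (if v = e then 1
               else [(1 : Int), 2, 3].foldl (fun s i => s + d.getD (v + i) 0) 0))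
          d).get? x = some (pvG sec e x) := by
  intro rest
  induction rest with
  | nil =>
    intro d _ _ h3 _ x hx
    simpa using h3 x hx (by simp)
  | cons v rest ih =>
    intro d hpw hmem h3 h4 x hx
    have hvsec : v ∈ sec := hmem v (by simp)
    have hrlt : ∀ r ∈ rest, r < v := (List.pairwise_cons.mp hpw).1
    have hgetD : ∀ i : Int, 0 < i →
        d.getD (v + i) 0 = if v + i ∈ sec then pvG sec e (v + i) else 0 := by
      intro i hi
      by_cases hm : v + i ∈ sec
      · have hnot : v + i ∉ v :: rest := by
          intro hc
          rcases List.mem_cons.mp hc with hc | hc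
          · omega
          · have := hrlt _ hc; omega
        rw [PySem.Dict.getD_eq_get?_getD, h3 _ hm hnot]
        simp [hm]
      · have hnone : d.get? (v + i) = none := by
          cases hopt : d.get? (v + i) with
          | none => rfl
          | some w => exact absurd (h4 _ (by simp [hopt])) hm
        rw [PySem.Dict.getD_eq_get?_getD, hnone]
        simp [hm]
    have hval : (if v = e then (1 : Int)
        else [(1 : Int), 2, 3].foldl (fun s i => s + d.getD (v + i) 0) 0) = pvG sec e v := by
      by_cases hv : v = e
      · rw [pvG]; simp [hv]
      · rw [if_neg hv, pvG, if_neg hv]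
        simp only [List.foldl]
        rw [hgetD 1 (by norm_num), hgetD 2 (by norm_num), hgetD 3 (by norm_num)]
        ring
    rw [List.foldl_cons]
    apply ih
    · exact (List.pairwise_cons.mp hpw).2
    · intro r hr; exact hmem r (by simp [hr])
    · intro y hy hynot
      by_cases hyv : y = v
      · subst hyv
        rw [PySem.Dict.get?_insert_self, hval]
      · rw [PySem.Dict.get?_insert, if_neg hyv]
        exact h3 y hy (by simp [hyv, hynot])
    · intro y hy
      by_cases hyv : y = v
      · subst hyv; exact hvsec
      · rw [PySem.Dict.get?_insert, if_neg hyv] at hy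
        exact h4 y hy
    · exact hx

theorem num_of_paths_spec : Claim_equal_num_of_paths := by
  unfold Claim_equal_num_of_paths
  intro sec _ hpre
  unfold Spec_num_of_paths Pre_num_of_paths at *
  cases sec with
  | nil => exact absurd rfl hpre
  | cons a t =>
    have hne : a :: t ≠ ([] : List Int) := by simp
    have hget0 : PySem.List.pyGet? (a :: t) 0 = some a := by
      simp
    have hgetl : PySem.List.pyGet? (a :: t) (-1) = some ((a :: t).getLast hne) := by
      rw [PySem.List.pyGet?_neg_one, List.getLast?_eq_some_getLast]
    have hA : num_of_paths (a :: t) = pvG (a :: t) ((a :: t).getLast hne) a := by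
      simp only [num_of_paths, hget0, hgetl]
      rw [pvLoopA_eq (a :: t) _ _ [[a]] 0 ?h]
      case h =>
        have hmu : pvMu (a :: t) (pvLastA [a]) ≤ (a :: t).length :=
          List.length_filter_le _ _
        have hpow := Nat.pow_le_pow_right (show 1 ≤ 4 by norm_num) hmu
        simp only [pvPhi, List.map_cons, List.map_nil, List.sum_cons, List.sum_nil]
        omega
      simp [pvLastA, PySem.List.pyGet?_neg_one]
    have hB : num_of_paths_alt (a :: t) = pvG (a :: t) ((a :: t).getLast hne) a := by
      have hsub : ∀ x ∈ PySem.List.sorted (PySem.Set.ofList (a :: t)) (fun x => x) true,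
          x ∈ a :: t := by
        intro x hx
        exact (PySem.Set.mem_ofList _ _).mp ((PySem.List.mem_sorted _ _ _ _).mp hx)
      have hsup : ∀ x ∈ (a :: t),
          x ∈ PySem.List.sorted (PySem.Set.ofList (a :: t)) (fun x => x) true := by
        intro x hx
        exact (PySem.List.mem_sorted _ _ _ _).mpr ((PySem.Set.mem_ofList _ _).mpr hx)
      have hnd : (PySem.List.sorted (PySem.Set.ofList (a :: t)) (fun x => x) true).Nodup := by
        exact (PySem.List.sorted_perm _ _ _).symm.nodup (PySem.Set.nodup_ofList _)
      have hle : (PySem.List.sorted (PySem.Set.ofList (a :: t)) (fun x => x) true).Pairwise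
          (fun p q => q ≤ p) := PySem.List.sorted_pairwise_rev _ _
      have hpw : (PySem.List.sorted (PySem.Set.ofList (a :: t)) (fun x => x) true).Pairwise
          (fun p q => q < p) :=
        (hle.and hnd).imp (fun h => lt_of_le_of_ne h.1 h.2.symm)
      have hget := pvFoldlB_get (a :: t) ((a :: t).getLast hne)
        (PySem.List.sorted (PySem.Set.ofList (a :: t)) (fun x => x) true)
        PySem.Dict.empty hpw hsub
        (fun x hx hnx => absurd (hsup x hx) hnx)
        (fun x hx => by simp [PySem.Dict.get?_empty] at hx)
        a (by simp)
      simp only [num_of_paths_alt, hget0, hgetl, Option.getD_some]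
      rw [hget]
      rfl
    rw [hA, hB]
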